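-- pv_equiv track=rewrite | github.com/hoiho77/algorithm_study | programmers/1차 알고리즘 문제풀이/예산.py | solution
-- ===== SOURCE A (Python) =====
-- def solution(d, budget):
--     d.sort()
--     for team_num in range(1,len(d)+1):
--         if sum(d[:team_num])>budget :
--             return team_num-1
--         elif sum(d[:team_num])==budget :
--             return team_num
--     return len(d)
-- ===== SOURCE B (Python) =====
-- def solution(d, budget):
--     d.sort()
--     s = 0
--     for i, x in enumerate(d):
--         s += x
--         if s > budget:
--             return i
--         if s == budget:
--             return i + 1
--     return len(d)
-- ===== Notes on version B (the rewrite author's own statement) =====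
-- stated objective: faster
-- what changed: B keeps a single running cumulative sum while scanning the sorted list once, instead of re-summing the whole prefix d[:k] at every iteration.
import Mathlib
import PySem

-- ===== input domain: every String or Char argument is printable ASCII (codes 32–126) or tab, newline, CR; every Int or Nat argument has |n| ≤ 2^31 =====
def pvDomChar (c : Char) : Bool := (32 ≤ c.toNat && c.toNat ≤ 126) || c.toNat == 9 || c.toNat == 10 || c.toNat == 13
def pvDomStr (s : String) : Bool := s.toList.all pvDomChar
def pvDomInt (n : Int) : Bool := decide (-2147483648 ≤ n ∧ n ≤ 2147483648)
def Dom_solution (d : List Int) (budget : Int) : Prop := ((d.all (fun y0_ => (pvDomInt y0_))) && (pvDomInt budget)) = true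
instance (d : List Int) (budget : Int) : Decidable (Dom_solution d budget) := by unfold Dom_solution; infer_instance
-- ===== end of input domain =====

-- B replaces A's per-iteration re-summing of the sorted prefix with one running cumulative sum (faster; both sort d in place — equivalence is about the return value).


-- ===== PORT A =====
-- the 'for team_num in range(1, len(d)+1)' loop with its early returns
def solutionLoopA (ds : List Int) (budget : Int) : List Int → Int
  | [] => (ds.length : Int)
  | t :: rest =>
    if (PySem.List.slice ds none (some t)).sum > budget then t - 1
    else if (PySem.List.slice ds none (some t)).sum = budget then t
    else solutionLoopA ds budget rest

def solution (d : List Int) (budget : Int) : Int :=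
  let ds := PySem.List.sorted d (fun x => x) false
  solutionLoopA ds budget (PySem.List.pyRange 1 ((ds.length : Int) + 1) 1)

-- ===== PORT B =====
-- the 'for i, x in enumerate(d)' loop carrying the running sum s
def solutionLoopB (budget : Int) : List Int → Int → Int → Int
  | [], _, i => i
  | x :: rest, s, i =>
    if s + x > budget then i
    else if s + x = budget then i + 1
    else solutionLoopB budget rest (s + x) (i + 1)

def solution_alt (d : List Int) (budget : Int) : Int :=
  solutionLoopB budget (PySem.List.sorted d (fun x => x) false) 0 0

-- ===== PRECONDITION & SPEC =====
def Spec_solution (d : List Int) (budget : Int) (out : Int) : Prop := out = solution_alt d budget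
instance (d : List Int) (budget : Int) (out : Int) : Decidable (Spec_solution d budget out) := by unfold Spec_solution; infer_instance

-- ===== CLAIM (what is proved, stated in full; the proofs are below) =====
def Claim_equal_solution : Prop := ∀ (d : List Int) (budget : Int), Dom_solution d budget → Spec_solution d budget (solution d budget)

-- ===== LEMMAS AND PROOFS =====

-- Loop invariant: after consuming prefix 'pre' of the sorted list, A's remaining range loop
-- computes the same value as B's loop on the suffix with running sum pre.sum and index pre.length.
theorem solutionLoop_agree (budget : Int) (suf : List Int) :
    ∀ pre : List Int,
      solutionLoopA (pre ++ suf) budget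
        (PySem.List.pyRange ((pre.length : Int) + 1) (((pre ++ suf).length : Int) + 1) 1)
      = solutionLoopB budget suf pre.sum (pre.length : Int) := by
  induction suf with
  | nil =>
    intro pre
    rw [PySem.List.pyRange_one_eq_nil (by simp)]
    simp [solutionLoopA, solutionLoopB]
  | cons x rest ih =>
    intro pre
    have hlen : ((pre.length : Int) + 1) < (((pre ++ x :: rest).length : Int) + 1) := by
      simp
    rw [PySem.List.pyRange_one_cons hlen]
    have hslice : PySem.List.slice (pre ++ x :: rest) none (some ((pre.length : Int) + 1))
        = pre ++ [x] := by
      have : ((pre.length : Int) + 1) = ((pre.length + 1 : Nat) : Int) := by push_cast; ring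
      rw [this, PySem.List.slice_to_natCast]
      simp [List.take_append]
    simp only [solutionLoopA, solutionLoopB, hslice, List.sum_append, List.sum_cons,
      List.sum_nil, add_zero]
    by_cases h1 : pre.sum + x > budget
    · simp [h1, add_sub_cancel_right]
    · by_cases h2 : pre.sum + x = budget
      · simp [h2]
      · simp only [if_neg (by omega : ¬ pre.sum + x > budget), if_neg h2]
        have := ih (pre ++ [x])
        simpa [List.append_assoc, add_assoc] using this

-- ===== VERDICT (by name: the statement is the Claim_ definition above) =====
theorem solution_spec : Claim_equal_solution := by
  intro d budget _
  show solution d budget = solution_alt d budget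
  unfold solution solution_alt
  simpa using solutionLoop_agree budget (PySem.List.sorted d (fun x => x) false) []
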